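-- pv_equiv track=rewrite | github.com/arachnofilas/word-search-remastered | search.py | remove_letters
-- ===== SOURCE A (Python) =====
-- import itertools as it
--
-- def remove_letters(filename):
--     remove_ch = 'AEIOUYHW'
--     prepared_file = ''
--     for word in filename.split():
--         word = (word[0] +
--                 ''.join(ch for ch in word[1:] if ch.upper() not in remove_ch))
--         prepared_file += ''.join(ch for ch, _ in it.groupby(word)) + ' '
--     return prepared_file
-- ===== SOURCE B (Python) =====
-- def remove_letters(filename):
--     VOWELS = 'AEIOUYHW'
--     out = []
--     prev = None  # None means: currently between words
--     for ch in filename: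
--         if ch.isspace():
--             if prev is not None:
--                 out.append(' ')
--                 prev = None
--         elif prev is None:
--             out.append(ch)
--             prev = ch
--         elif ch.upper() not in VOWELS and ch != prev:
--             out.append(ch)
--             prev = ch
--     if prev is not None:
--         out.append(' ')
--     return ''.join(out)
-- ===== Notes on version B (the rewrite author's own statement) =====
-- stated objective: alternative
-- what changed: Replaces A's split-into-words then per-word filter+groupby passes by a single character-by-character scan of the whole string with an Option prev state (None = between words) that does word segmentation, vowel skipping and duplicate collapsing in one traversal with no intermediate word list or strings.
import Mathlib
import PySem

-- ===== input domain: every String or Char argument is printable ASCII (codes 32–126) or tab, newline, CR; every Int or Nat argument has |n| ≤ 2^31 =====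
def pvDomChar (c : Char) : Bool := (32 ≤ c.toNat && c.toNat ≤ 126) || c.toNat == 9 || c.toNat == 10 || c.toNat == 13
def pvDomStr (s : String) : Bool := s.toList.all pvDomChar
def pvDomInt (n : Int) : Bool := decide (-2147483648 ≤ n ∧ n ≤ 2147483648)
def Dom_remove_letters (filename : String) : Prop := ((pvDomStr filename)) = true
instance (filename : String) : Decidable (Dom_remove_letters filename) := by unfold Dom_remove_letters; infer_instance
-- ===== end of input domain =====

-- B replaces A's split-then-per-word filter+groupby by one char-by-char scan with an Option prev state; same cost, different algorithmic decomposition.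


-- ===== PORT A =====
def pvVowels : List Char := "AEIOUYHW".toList   -- remove_ch = 'AEIOUYHW'
-- ''.join(ch for ch, _ in it.groupby(word)) : keep the first char of each run
def pvGroupbyFirstsAux (prev : Char) : List Char → List Char
  | [] => []
  | c :: rest => if c == prev then pvGroupbyFirstsAux prev rest else c :: pvGroupbyFirstsAux c rest

def pvGroupbyFirsts : List Char → List Char
  | [] => []
  | c :: rest => c :: pvGroupbyFirstsAux c rest

-- one iteration of A's loop body (word from .split() is never empty, so [] is unreachable)
def pvBodyA (word : List Char) : List Char :=
  match word with
  | [] => []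
  | c :: rest =>
    pvGroupbyFirsts (c :: rest.filter (fun ch => !(PySem.Chars.isIn [PySem.Chars.upperChar ch] pvVowels)))

def remove_letters (filename : String) : String :=
  String.ofList ((PySem.Chars.split₀ filename.toList).foldl (fun acc word => acc ++ pvBodyA word ++ [' ']) [])

-- ===== PORT B =====
-- one scan over the raw character stream; state = Option prev (none = between words)
def pvScanB : List Char → Option Char → List Char
  | [], none => []
  | [], some _ => [' ']
  | ch :: rest, none =>
      if PySem.Chars.isspace ch then pvScanB rest none
      else ch :: pvScanB rest (some ch)
  | ch :: rest, some prev =>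
      if PySem.Chars.isspace ch then ' ' :: pvScanB rest none
      else if !(PySem.Chars.isIn [PySem.Chars.upperChar ch] "AEIOUYHW".toList) && ch != prev then
        ch :: pvScanB rest (some ch)
      else pvScanB rest (some prev)

def remove_letters_alt (filename : String) : String :=
  String.ofList (pvScanB filename.toList none)

-- ===== PRECONDITION & SPEC =====
def Spec_remove_letters (filename : String) (out : String) : Prop := out = remove_letters_alt filename
instance (filename : String) (out : String) : Decidable (Spec_remove_letters filename out) := by unfold Spec_remove_letters; infer_instance

-- ===== CLAIM =====
def Claim_equal_remove_letters : Prop := ∀ (filename : String), Dom_remove_letters filename → Spec_remove_letters filename (remove_letters filename)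

-- ===== LEMMAS AND PROOFS =====
-- the first word of cs and the remainder (starting at the terminating space, if any)
def pvWordOf (cs : List Char) : List Char := cs.takeWhile (fun c => !PySem.Chars.isspace c)
def pvRestOf (cs : List Char) : List Char := cs.dropWhile (fun c => !PySem.Chars.isspace c)

-- B's in-word behaviour, isolated (proof device only)
def pvGoB (prev : Char) : List Char → List Char
  | [] => []
  | ch :: rest =>
    if PySem.Chars.isIn [PySem.Chars.upperChar ch] pvVowels then pvGoB prev rest
    else if ch == prev then pvGoB prev rest
    else ch :: pvGoB ch rest

theorem pvAux_eq_go (prev : Char) (rest : List Char) :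
    pvGroupbyFirstsAux prev (rest.filter (fun ch => !(PySem.Chars.isIn [PySem.Chars.upperChar ch] pvVowels))) = pvGoB prev rest := by
  induction rest generalizing prev with
  | nil => rfl
  | cons ch rest ih =>
    simp only [List.filter_cons, pvGoB]
    by_cases h : PySem.Chars.isIn [PySem.Chars.upperChar ch] pvVowels
    · simp [h, ih]
    · simp only [h, Bool.not_false, if_true, if_false, Bool.false_eq_true]
      simp only [pvGroupbyFirstsAux]
      by_cases hp : ch = prev
      · simp [hp, ih]
      · simp [hp, ih]

theorem pvBodyA_cons (c : Char) (rest : List Char) :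
    pvBodyA (c :: rest) = c :: pvGoB c rest := by
  simp [pvBodyA, pvGroupbyFirsts, pvAux_eq_go]

-- split₀.go accumulator lemma
theorem pvGo_acc (cs : List Char) : ∀ cur acc,
    PySem.Chars.split₀.go cs cur acc = acc.reverse ++ PySem.Chars.split₀.go cs cur [] := by
  induction cs with
  | nil =>
    intro cur acc
    cases h : cur.isEmpty <;> simp [PySem.Chars.split₀.go, h]
  | cons c rest ih =>
    intro cur acc
    cases hs : PySem.Chars.isspace c with
    | true =>
      cases h : cur.isEmpty with
      | true =>
        simp only [PySem.Chars.split₀.go, hs, h, if_true]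
        exact ih [] acc
      | false =>
        simp only [PySem.Chars.split₀.go, hs, h, if_true, Bool.false_eq_true, if_false]
        rw [ih [] (cur.reverse :: acc), ih [] [cur.reverse]]
        simp
    | false =>
      simp only [PySem.Chars.split₀.go, hs, Bool.false_eq_true, if_false]
      exact ih (c :: cur) acc

theorem pvGo_word (cs : List Char) : ∀ c cur,
    PySem.Chars.split₀.go cs (c :: cur) [] =
      ((c :: cur).reverse ++ pvWordOf cs) :: PySem.Chars.split₀.go (pvRestOf cs) [] [] := by
  induction cs with
  | nil =>
    intro c cur
    simp [PySem.Chars.split₀.go, pvWordOf, pvRestOf]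
  | cons d rest ih =>
    intro c cur
    cases hs : PySem.Chars.isspace d with
    | true =>
      simp only [PySem.Chars.split₀.go, hs, if_true, List.isEmpty_cons, Bool.false_eq_true,
        if_false]
      rw [pvGo_acc]
      have hw : pvWordOf (d :: rest) = [] := by simp [pvWordOf, List.takeWhile, hs]
      have hr : pvRestOf (d :: rest) = d :: rest := by simp [pvRestOf, List.dropWhile, hs]
      rw [hw, hr]
      simp only [PySem.Chars.split₀.go, hs, if_true, List.isEmpty_nil]
      simp
    | false =>
      simp only [PySem.Chars.split₀.go, hs, Bool.false_eq_true, if_false]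
      rw [ih d (c :: cur)]
      have hw : pvWordOf (d :: rest) = d :: pvWordOf rest := by
        simp [pvWordOf, List.takeWhile, hs]
      have hr : pvRestOf (d :: rest) = pvRestOf rest := by
        simp [pvRestOf, List.dropWhile, hs]
      rw [hw, hr]
      simp

theorem pvSplit_cons_space {c : Char} (rest : List Char) (hs : PySem.Chars.isspace c = true) :
    PySem.Chars.split₀ (c :: rest) = PySem.Chars.split₀ rest := by
  simp [PySem.Chars.split₀, PySem.Chars.split₀.go, hs]

theorem pvSplit_cons_word {c : Char} (rest : List Char) (hs : PySem.Chars.isspace c = false) :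
    PySem.Chars.split₀ (c :: rest) = (c :: pvWordOf rest) :: PySem.Chars.split₀ (pvRestOf rest) := by
  simp only [PySem.Chars.split₀, PySem.Chars.split₀.go, hs, Bool.false_eq_true, if_false]
  have := pvGo_word rest c []
  simpa using this

-- B's scan inside a word equals pvGoB on the word followed by the rest
theorem pvScan_some (cs : List Char) : ∀ p,
    pvScanB cs (some p) = pvGoB p (pvWordOf cs) ++ ' ' :: pvScanB (pvRestOf cs) none := by
  induction cs with
  | nil => intro p; simp [pvScanB, pvWordOf, pvRestOf, pvGoB]
  | cons ch rest ih =>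
    intro p
    cases hs : PySem.Chars.isspace ch with
    | true =>
      simp [pvScanB, hs, pvWordOf, pvRestOf, List.takeWhile, List.dropWhile, pvGoB]
    | false =>
      simp only [pvScanB, hs, Bool.false_eq_true, if_false]
      have hw : pvWordOf (ch :: rest) = ch :: pvWordOf rest := by
        simp [pvWordOf, List.takeWhile, hs]
      have hr : pvRestOf (ch :: rest) = pvRestOf rest := by
        simp [pvRestOf, List.dropWhile, hs]
      rw [hw, hr]
      cases hv : PySem.Chars.isIn [PySem.Chars.upperChar ch] (['A', 'E', 'I', 'O', 'U', 'Y', 'H', 'W']) with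
      | true => simp [pvGoB, pvVowels, hv, ih]
      | false =>
        by_cases he : ch = p
        · subst he; simp [pvGoB, pvVowels, hv, ih]
        · simp [pvGoB, pvVowels, hv, he, ih]

theorem pvLength_restOf_le (cs : List Char) : (pvRestOf cs).length ≤ cs.length := by
  simpa [pvRestOf] using List.length_dropWhile_le (fun c => !PySem.Chars.isspace c) cs

-- main invariant: the scan equals the flatMap over split₀
theorem pvScan_none : ∀ (n : Nat) (cs : List Char), cs.length ≤ n →
    pvScanB cs none = (PySem.Chars.split₀ cs).flatMap (fun w => pvBodyA w ++ [' ']) := by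
  intro n
  induction n with
  | zero =>
    intro cs h
    have : cs = [] := List.eq_nil_of_length_eq_zero (Nat.le_zero.mp h)
    subst this
    simp [pvScanB, PySem.Chars.split₀, PySem.Chars.split₀.go]
  | succ n ih =>
    intro cs h
    cases cs with
    | nil => simp [pvScanB, PySem.Chars.split₀, PySem.Chars.split₀.go]
    | cons c rest =>
      cases hs : PySem.Chars.isspace c with
      | true =>
        rw [pvSplit_cons_space rest hs]
        simp only [pvScanB, hs, if_true]
        exact ih rest (Nat.le_of_succ_le_succ h)
      | false =>
        rw [pvSplit_cons_word rest hs]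
        simp only [pvScanB, hs, Bool.false_eq_true, if_false, List.flatMap_cons]
        rw [pvScan_some, pvBodyA_cons]
        have hlen : (pvRestOf rest).length ≤ n :=
          le_trans (pvLength_restOf_le rest) (Nat.le_of_succ_le_succ h)
        rw [ih (pvRestOf rest) hlen]
        simp

-- ===== VERDICT =====
theorem remove_letters_spec : Claim_equal_remove_letters := by
  intro filename _
  unfold Spec_remove_letters remove_letters remove_letters_alt
  simp only [List.append_assoc]
  rw [PySem.List.foldl_append_eq_flatMap (g := fun w => pvBodyA w ++ [' ']),
    pvScan_none filename.toList.length filename.toList le_rfl]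
  simp
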